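-- pv_equiv track=rewrite | github.com/KruzerKnight/Soln-Repo | 1894-find-the-student-that-will-replace-the-chalk/1894-find-the-student-that-will-replace-the-chalk.py | chalkReplacer
-- ===== SOURCE A (Python) =====
-- from typing import List
--
-- def chalkReplacer(chalk: List[int], k: int) -> int:
--     s=sum(chalk)
--     r=k%s
--     rs=0
--     for i in range(len(chalk)):
--         if rs>r:
--             return i-1
--         rs+=chalk[i]
--     return i
-- ===== SOURCE B (Python) =====
-- from typing import List
-- from itertools import accumulate
-- from bisect import bisect_right
--
-- def chalkReplacer(chalk: List[int], k: int) -> int: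
--     prefix = list(accumulate(chalk))
--     r = k % sum(chalk)
--     return bisect_right(prefix, r)
-- ===== Notes on version B (the rewrite author's own statement) =====
-- stated objective: alternative
-- what changed: Replaces A's single running-total linear scan (mutable accumulator, early return i-1, leftover-variable fallthrough) by a staged table-then-binary-search algorithm: build the prefix-sum table once with itertools.accumulate and locate the answer with bisect_right's logarithmic search; Pre_ keeps exactly the inputs binary search can serve — monotone prefix table (all piles after the first nonnegative) with positive total — excluding sum==0, where both programs raise ZeroDivisionError, and non-monotone/negative-sum inputs where A's scan returns a meaningless index (e.g. …
-- outside the precondition, e.g. on chalkReplacer([2, -1, 2], 1): A returns 0, B returns 2; on chalkReplacer([-3], 5): A returns -1, B returns 1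
import Mathlib
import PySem

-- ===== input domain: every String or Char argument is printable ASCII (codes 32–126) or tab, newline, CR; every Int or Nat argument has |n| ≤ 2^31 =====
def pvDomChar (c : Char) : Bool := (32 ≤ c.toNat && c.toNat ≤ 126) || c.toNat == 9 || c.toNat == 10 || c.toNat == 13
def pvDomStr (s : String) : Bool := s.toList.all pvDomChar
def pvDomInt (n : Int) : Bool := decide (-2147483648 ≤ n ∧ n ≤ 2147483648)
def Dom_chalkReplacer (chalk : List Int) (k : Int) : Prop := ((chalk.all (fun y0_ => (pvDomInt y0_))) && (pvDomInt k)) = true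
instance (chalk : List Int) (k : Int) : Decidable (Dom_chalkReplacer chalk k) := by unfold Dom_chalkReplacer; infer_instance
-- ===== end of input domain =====

-- B replaces A's running-total linear scan by a staged algorithm: build the pfx-sum
-- table (itertools.accumulate) once, then find the student with bisect_right's binary
-- search; Pre_ restricts to the task's natural domain (nonnegative piles, nonzero sum).


-- ===== PORT A =====
-- A's loop: `for i in range(len(chalk)): if rs>r: return i-1; rs+=chalk[i]`,
-- falling through to `return i` (the leftover loop variable, i.e. len-1)
def chalkA_loop (chalk : List Int) (r : Int) (rs : Int) (i : Nat) : Int :=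
  if i < chalk.length then
    if rs > r then (i : Int) - 1
    else chalkA_loop chalk r (rs + chalk.getD i 0) (i + 1)
  else (chalk.length : Int) - 1
termination_by chalk.length - i
decreasing_by omega

def chalkReplacer (chalk : List Int) (k : Int) : Int :=
  let s := chalk.sum
  let r := PySem.Int.mod k s
  chalkA_loop chalk r 0 0

-- ===== PORT B =====
-- itertools.accumulate(xs): the running sums, starting from run
def accFrom (run : Int) : List Int → List Int
  | [] => []
  | x :: xs => (run + x) :: accFrom (run + x) xs

-- pfx = list(accumulate(chalk)); r = k % sum(chalk); return bisect_right(pfx, r)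
def chalkReplacer_alt (chalk : List Int) (k : Int) : Int :=
  let pfx := accFrom 0 chalk
  let r := PySem.Int.mod k chalk.sum
  (PySem.List.bisectRight pfx r : Int)

-- ===== PRECONDITION & SPEC =====
-- Pre_ is the task's natural domain, widened to everything binary search can serve:
-- the prefix-sum table must be monotone (every pile after the first nonnegative) with
-- positive total; sum = 0 (both programs raise ZeroDivisionError at k % sum) and
-- negative-sum / non-monotone inputs — where A still returns a value, but an index
-- like -1 that is meaningless for the chalk task, and binary search is inapplicable —
-- are out.
def Pre_chalkReplacer (chalk : List Int) (k : Int) : Prop :=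
  (∀ x ∈ chalk.tail, 0 ≤ x) ∧ 0 < chalk.sum
instance (chalk : List Int) (k : Int) : Decidable (Pre_chalkReplacer chalk k) := by
  unfold Pre_chalkReplacer; infer_instance

def pvWitness_chalkReplacer : List Int × Int := ([3, 4, 1, 2], 25)

def Spec_chalkReplacer (chalk : List Int) (k : Int) (out : Int) : Prop := out = chalkReplacer_alt chalk k
instance (chalk : List Int) (k : Int) (out : Int) : Decidable (Spec_chalkReplacer chalk k out) := by unfold Spec_chalkReplacer; infer_instance

-- ===== CLAIM (what is proved, stated in full; the proofs are below) =====
def Claim_equal_chalkReplacer : Prop := ∀ (chalk : List Int) (k : Int), Dom_chalkReplacer chalk k → Pre_chalkReplacer chalk k → Spec_chalkReplacer chalk k (chalkReplacer chalk k)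

-- ===== LEMMAS AND PROOFS =====

lemma length_accFrom (c : Int) (xs : List Int) : (accFrom c xs).length = xs.length := by
  induction xs generalizing c with
  | nil => rfl
  | cons x xs ih => simp [accFrom, ih]

lemma accFrom_getElem (c : Int) (xs : List Int) :
    ∀ j (h : j < xs.length),
      (accFrom c xs)[j]'(by rw [length_accFrom]; exact h) = c + (xs.take (j + 1)).sum := by
  induction xs generalizing c with
  | nil => intro j h; simp at h
  | cons x xs ih =>
    intro j h
    cases j with
    | zero => simp [accFrom]
    | succ j =>
      have := ih (c + x) j (by simpa using h)
      simp only [accFrom, List.getElem_cons_succ, List.take_succ_cons, List.sum_cons, this]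
      ring

lemma sum_take_succ (xs : List Int) : ∀ i, i < xs.length →
    (xs.take (i + 1)).sum = (xs.take i).sum + xs.getD i 0 := by
  induction xs with
  | nil => intro i h; simp at h
  | cons x xs ih =>
    intro i h
    cases i with
    | zero => simp
    | succ i =>
      have := ih i (by simpa using h)
      simp [List.take_succ_cons, this, add_assoc, add_comm, add_left_comm]

lemma sum_take_step_le (xs : List Int) (hx : ∀ x ∈ xs.tail, 0 ≤ x) (i : Nat)
    (hi : 1 ≤ i) : (xs.take i).sum ≤ (xs.take (i + 1)).sum := by
  rcases Nat.lt_or_ge i xs.length with h | h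
  · have := sum_take_succ xs i h
    have hg : 0 ≤ xs.getD i 0 := by
      rw [List.getD_eq_getElem xs 0 h]
      refine hx _ ?_
      have : xs.tail[i-1]'(by simp [List.length_tail]; omega) = xs[i]'h := by
        rw [List.getElem_tail]; congr 1; omega
      rw [← this]; exact List.getElem_mem _
    omega
  · rw [List.take_of_length_le h, List.take_of_length_le (by omega)]

lemma sum_take_mono (xs : List Int) (hx : ∀ x ∈ xs.tail, 0 ≤ x) :
    ∀ i j, 1 ≤ i → i ≤ j → (xs.take i).sum ≤ (xs.take j).sum := by
  intro i j hi hij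
  induction j with
  | zero => omega
  | succ j ih =>
    rcases Nat.lt_or_ge i (j + 1) with h | h
    · exact le_trans (ih (by omega)) (sum_take_step_le xs hx j (by omega))
    · have : i = j + 1 := by omega
      subst this; rfl

lemma accFrom_pairwise (xs : List Int) (hx : ∀ x ∈ xs.tail, 0 ≤ x) :
    (accFrom 0 xs).Pairwise (fun a b => a ≤ b) := by
  rw [List.pairwise_iff_getElem]
  intro p q hp hq hpq
  rw [accFrom_getElem 0 xs p (by rwa [length_accFrom] at hp),
      accFrom_getElem 0 xs q (by rwa [length_accFrom] at hq)]
  simpa using sum_take_mono xs hx (p + 1) (q + 1) (by omega) (by omega)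

-- A's loop, started at index i with the running sum of the first i elements, returns
-- b = bisect_right(pfx, r) whenever i ≤ b + 1 (the loop exits at iteration b+1).
lemma chalkA_loop_eq_bisect (chalk : List Int) (r : Int)
    (hx : ∀ x ∈ chalk.tail, 0 ≤ x) (hr : 0 ≤ r) (hb : PySem.List.bisectRight (accFrom 0 chalk) r + 1 ≤ chalk.length) :
    ∀ i, i ≤ PySem.List.bisectRight (accFrom 0 chalk) r + 1 →
      chalkA_loop chalk r ((chalk.take i).sum) i =
        (PySem.List.bisectRight (accFrom 0 chalk) r : Int) := by
  set pfx := accFrom 0 chalk with hpre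
  set b := PySem.List.bisectRight pfx r with hbdef
  obtain ⟨hble, hlt, hgt⟩ := PySem.List.bisectRight_spec pfx r (accFrom_pairwise chalk hx)
  have hlen : pfx.length = chalk.length := length_accFrom 0 chalk
  intro i hi
  induction hn : (b + 1 - i) generalizing i with
  | zero =>
    -- i = b + 1: the loop exits here (either the guard fires or the range is exhausted)
    have hib : i = b + 1 := by omega
    subst hib
    rw [chalkA_loop]
    have hrs : (chalk.take (b + 1)).sum = pfx[b]'(by omega) := by
      rw [accFrom_getElem 0 chalk b (by omega)]; simp
    rcases Nat.lt_or_ge (b + 1) chalk.length with hcase | hcase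
    · have : r < pfx[b]'(by omega) := hgt b (by omega) (by omega)
      rw [if_pos hcase, if_pos (by omega)]
      push_cast; ring
    · have : b + 1 = chalk.length := by omega
      rw [if_neg (by omega)]
      omega
  | succ n ih =>
    -- i ≤ b < chalk.length: the guard cannot fire, the loop advances
    have hib : i ≤ b := by omega
    rw [chalkA_loop, if_pos (by omega)]
    have hrs_le : (chalk.take i).sum ≤ r := by
      cases i with
      | zero => simpa using hr
      | succ j =>
        have : pfx[j]'(by omega) ≤ r := hlt j (by omega) (by omega)
        rw [accFrom_getElem 0 chalk j (by omega)] at this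
        simpa using this
    rw [if_neg (by omega), ← sum_take_succ chalk i (by omega)]
    exact ih (i + 1) (by omega) (by omega)

-- ===== VERDICT (by name: the statement is the Claim_ definition above) =====
theorem chalkReplacer_spec : Claim_equal_chalkReplacer := by
  intro chalk k _ hpre
  obtain ⟨hx, hs_pos⟩ := hpre
  have hne : chalk ≠ [] := by rintro rfl; simp at hs_pos
  have hn : 0 < chalk.length := List.length_pos_iff.mpr hne
  set r := PySem.Int.mod k chalk.sum with hrdef
  have hr0 : 0 ≤ r := PySem.Int.mod_nonneg k hs_pos
  have hrlt : r < chalk.sum := PySem.Int.mod_lt k hs_pos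
  obtain ⟨hble, hlt, hgt⟩ :=
    PySem.List.bisectRight_spec (accFrom 0 chalk) r (accFrom_pairwise chalk hx)
  have hlen : (accFrom 0 chalk).length = chalk.length := length_accFrom 0 chalk
  -- the last pfx sum is the full sum, which exceeds r, so bisect lands strictly inside
  have hb_lt : PySem.List.bisectRight (accFrom 0 chalk) r < chalk.length := by
    by_contra hcon
    have hbn : PySem.List.bisectRight (accFrom 0 chalk) r = chalk.length := by omega
    have hlast : (accFrom 0 chalk)[chalk.length - 1]'(by omega) ≤ r :=
      hlt (chalk.length - 1) (by omega) (by omega)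
    rw [accFrom_getElem 0 chalk (chalk.length - 1) (by omega)] at hlast
    rw [Nat.sub_add_cancel hn, List.take_of_length_le (le_refl _)] at hlast
    omega
  have := chalkA_loop_eq_bisect chalk r hx hr0 (by omega) 0 (by omega)
  unfold Spec_chalkReplacer chalkReplacer chalkReplacer_alt
  simpa using this
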